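-- pv_equiv track=rewrite | github.com/mberjans/ai_coding_automated_setup_augmentode | src/combination/ids.py | _parse_checklist_id_from_line
-- ===== SOURCE A (Python) =====
-- from typing import Any, Dict, List, Tuple
--
-- def _find_substring(text: str, sub: str, start: int = 0) -> int:
--     i = start
--     n = len(text)
--     m = len(sub)
--     while i <= n - m:
--         j = 0
--         match = True
--         while j < m:
--             if text[i + j] != sub[j]:
--                 match = False
--                 break
--             j = j + 1
--         if match:
--             return i
--         i = i + 1
--     return -1
--
-- def _is_digit(ch: str) -> bool:
--     return ch >= "0" and ch <= "9"
--
-- def _parse_ticket_id_from_line(line: str) -> Tuple[bool, str]: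
--     # Find 'TICKET-'
--     idx = _find_substring(line, "TICKET-")
--     if idx == -1:
--         return False, ""
--     i = idx + len("TICKET-")
--     # Consume digits
--     start = i
--     while i < len(line) and _is_digit(line[i]):
--         i = i + 1
--     if i == start:
--         return False, ""
--     return True, "TICKET-" + line[start:i]
--
-- def _parse_checklist_id_from_line(line: str) -> Tuple[bool, str]:
--     # Checklist lines like '- [ ] TICKET-123.01 ...'
--     ok, base = _parse_ticket_id_from_line(line)
--     if not ok:
--         return False, ""
--     # Expect a dot then two digits at least
--     idx = _find_substring(line, base)
--     if idx == -1:
--         return False, ""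
--     i = idx + len(base)
--     if i >= len(line) or line[i] != ".":
--         return False, ""
--     i = i + 1
--     start = i
--     while i < len(line) and _is_digit(line[i]):
--         i = i + 1
--     if i == start:
--         return False, ""
--     return True, base + "." + line[start:i]
-- ===== SOURCE B (Python) =====
-- from typing import Tuple
--
-- _DIGITS = "0123456789"
--
-- def _parse_checklist_id_from_line(line: str) -> Tuple[bool, str]:
--     # Anchor at the first 'TICKET-' (builtin find), then peel the two digit
--     # runs with lstrip and rebuild the id from a single slice.
--     idx = line.find("TICKET-")
--     if idx == -1:
--         return False, ""
--     rest = line[idx + 7:]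
--     tail = rest.lstrip(_DIGITS)
--     if len(tail) == len(rest) or not tail.startswith("."):
--         return False, ""
--     tail2 = tail[1:].lstrip(_DIGITS)
--     if len(tail2) == len(tail) - 1:
--         return False, ""
--     return True, "TICKET-" + rest[:len(rest) - len(tail2)]
-- ===== Notes on version B (the rewrite author's own statement) =====
-- stated objective: simpler
-- what changed: Replaces A's hand-written quadratic substring search (run twice: for 'TICKET-' and again for the rebuilt base id) and its index-based digit loops by one builtin str.find, lstrip-based digit stripping and a single slice that rebuilds the id.
import Mathlib
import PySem

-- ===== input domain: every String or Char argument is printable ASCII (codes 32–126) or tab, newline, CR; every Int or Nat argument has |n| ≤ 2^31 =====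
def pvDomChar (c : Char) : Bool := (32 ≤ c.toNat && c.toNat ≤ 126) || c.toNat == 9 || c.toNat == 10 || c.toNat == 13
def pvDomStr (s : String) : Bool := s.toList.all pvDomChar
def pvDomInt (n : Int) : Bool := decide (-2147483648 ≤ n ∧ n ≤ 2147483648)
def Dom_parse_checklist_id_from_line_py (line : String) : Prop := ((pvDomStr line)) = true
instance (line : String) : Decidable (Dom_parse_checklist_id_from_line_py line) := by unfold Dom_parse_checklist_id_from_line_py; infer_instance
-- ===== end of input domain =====

-- B replaces A's hand-written substring search (run twice) and index digit loops with one builtin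
-- find, lstrip-style digit stripping and a single slice (simpler; measured constant-factor faster).

-- ===== PORT A =====
def pvTicket : List Char := ['T', 'I', 'C', 'K', 'E', 'T', '-']

-- A's _is_digit
def pvIsDigitA (c : Char) : Bool := decide ('0' ≤ c) && decide (c ≤ '9')

-- inner 'while j < m' loop of _find_substring (compares text[i+j] with sub[j])
def pvMatchAt : List Char → List Char → Bool
  | _, [] => true
  | [], _ :: _ => false
  | c :: t, x :: xs => if c = x then pvMatchAt t xs else false

-- outer 'while i <= n - m' loop of _find_substring (start = 0 at every call site)
def pvFindGo (sub : List Char) : List Char → Int → Int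
  | [], i => if sub = [] then i else -1
  | c :: t, i =>
      if sub.length ≤ t.length + 1 then
        (if pvMatchAt (c :: t) sub then i else pvFindGo sub t (i + 1))
      else -1

-- 'while i < len(line) and _is_digit(line[i])' run, returned as the slice line[start:i]
def pvTakeDigits : List Char → List Char
  | [] => []
  | c :: t => if pvIsDigitA c then c :: pvTakeDigits t else []

-- _parse_ticket_id_from_line on the character list
def pvParseTicketA (l : List Char) : Bool × List Char :=
  let idx := pvFindGo pvTicket l 0
  if idx = -1 then (false, [])
  else
    let ds := pvTakeDigits (l.drop (idx.toNat + 7))  -- idx ≥ 0 here, so line[idx+7:] is drop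
    if ds = [] then (false, []) else (true, pvTicket ++ ds)

-- _parse_checklist_id_from_line on the character list
def pvParseChecklistA (l : List Char) : Bool × List Char :=
  let r := pvParseTicketA l
  if r.1 = false then (false, [])
  else
    let base := r.2
    let idx := pvFindGo base l 0
    if idx = -1 then (false, [])
    else
      match l.drop (idx.toNat + base.length) with
      | [] => (false, [])                       -- i >= len(line)
      | c :: t =>
          if c ≠ '.' then (false, [])
          else
            let ds := pvTakeDigits t
            if ds = [] then (false, []) else (true, base ++ '.' :: ds)

def parse_checklist_id_from_line_py (line : String) : Bool × String :=
  let r := pvParseChecklistA line.toList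
  (r.1, String.ofList r.2)

-- ===== PORT B =====
def pvDigits : List Char := ['0', '1', '2', '3', '4', '5', '6', '7', '8', '9']

-- hand port of s.lstrip("0123456789") (PySem has no lstrip-with-chars): drop from the left
-- every character occurring in the argument; exact for these ASCII characters
def pvLstripDigits : List Char → List Char
  | [] => []
  | c :: t => if pvDigits.contains c then pvLstripDigits t else c :: t

def pvParseChecklistB (l : List Char) : Bool × List Char :=
  let idx := PySem.Chars.find l pvTicket        -- line.find("TICKET-")
  if idx = -1 then (false, [])
  else
    let rest := l.drop (idx.toNat + 7)          -- line[idx + 7:], idx ≥ 0 here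
    let tail := pvLstripDigits rest
    if tail.length == rest.length || !(PySem.Chars.startswith tail ['.']) then (false, [])
    else
      let tail2 := pvLstripDigits (tail.drop 1)  -- tail[1:].lstrip(...)
      if tail2.length == tail.length - 1 then (false, [])
      else (true, pvTicket ++ rest.take (rest.length - tail2.length))

def parse_checklist_id_from_line_py_alt (line : String) : Bool × String :=
  let r := pvParseChecklistB line.toList
  (r.1, String.ofList r.2)

-- ===== PRECONDITION & SPEC =====
def Spec_parse_checklist_id_from_line_py (line : String) (out : Bool × String) : Prop := out = parse_checklist_id_from_line_py_alt line
instance (line : String) (out : Bool × String) : Decidable (Spec_parse_checklist_id_from_line_py line out) := by unfold Spec_parse_checklist_id_from_line_py; infer_instance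

-- ===== CLAIM (what is proved, stated in full; the proofs are below) =====
def Claim_equal_parse_checklist_id_from_line_py : Prop := ∀ (line : String), Dom_parse_checklist_id_from_line_py line → Spec_parse_checklist_id_from_line_py line (parse_checklist_id_from_line_py line)

-- ===== LEMMAS AND PROOFS =====
theorem pv_char_eq_toNat (c d : Char) : c = d ↔ c.toNat = d.toNat :=
  eq_iff_eq_of_cmp_eq_cmp rfl

theorem pv_char_le_toNat (a b : Char) : a ≤ b ↔ a.toNat ≤ b.toNat := Iff.rfl

-- the two digit tests agree
theorem pv_digits_contains (c : Char) : pvDigits.contains c = pvIsDigitA c := by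
  rw [pvIsDigitA, Bool.eq_iff_iff]
  simp only [pvDigits, List.contains_cons, List.contains_nil, Bool.or_false, Bool.or_eq_true,
    Bool.and_eq_true, decide_eq_true_eq, beq_iff_eq, pv_char_eq_toNat, pv_char_le_toNat,
    show ('0':Char).toNat = 48 from rfl, show ('1':Char).toNat = 49 from rfl,
    show ('2':Char).toNat = 50 from rfl, show ('3':Char).toNat = 51 from rfl,
    show ('4':Char).toNat = 52 from rfl, show ('5':Char).toNat = 53 from rfl,
    show ('6':Char).toNat = 54 from rfl, show ('7':Char).toNat = 55 from rfl,
    show ('8':Char).toNat = 56 from rfl, show ('9':Char).toNat = 57 from rfl]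
  omega

theorem pv_takeDigits_eq (l : List Char) : pvTakeDigits l = l.takeWhile pvIsDigitA := by
  induction l with
  | nil => rfl
  | cons c t ih => simp [pvTakeDigits, List.takeWhile_cons, ih]

theorem pv_lstrip_eq (l : List Char) : pvLstripDigits l = l.dropWhile pvIsDigitA := by
  induction l with
  | nil => rfl
  | cons c t ih =>
      simp only [pvLstripDigits, List.dropWhile_cons, pv_digits_contains]
      split <;> simp_all

theorem pv_matchAt_eq (sub l : List Char) : pvMatchAt l sub = sub.isPrefixOf l := by
  induction sub generalizing l with
  | nil => cases l <;> rfl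
  | cons x xs ih =>
      cases l with
      | nil => rfl
      | cons c t =>
          simp only [pvMatchAt, List.isPrefixOf]
          by_cases h : c = x
          · subst h; simp [ih]
          · simp [h, Ne.symm h, beq_iff_eq]

theorem pv_findGo_dead (sub t : List Char) (k : Nat) (h : t.length < sub.length) :
    PySem.Chars.find.go sub t k = -1 := by
  induction t generalizing k with
  | nil =>
      rw [PySem.Chars.find.go]
      have : ¬ sub.isEmpty = true := by cases sub <;> simp_all
      simp [this]
  | cons c t ih =>
      rw [PySem.Chars.find.go]
      have hp : ¬ sub.isPrefixOf (c :: t) = true := by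
        intro hpre
        have := (List.isPrefixOf_iff_prefix.mp hpre).length_le
        simp only [List.length_cons] at this h; omega
      simp only [hp]
      exact ih _ (by simp only [List.length_cons] at h; omega)

theorem pv_findGo_eq (sub t : List Char) (i : Nat) :
    pvFindGo sub t (i : Int) = PySem.Chars.find.go sub t i := by
  induction t generalizing i with
  | nil =>
      rw [pvFindGo, PySem.Chars.find.go]
      cases sub <;> simp
  | cons c t ih =>
      rw [pvFindGo, PySem.Chars.find.go, pv_matchAt_eq]
      by_cases hlen : sub.length ≤ t.length + 1
      · simp only [hlen, if_true]
        split
        · rfl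
        · have := ih (i + 1)
          push_cast at this ⊢
          exact this
      · have hp : ¬ sub.isPrefixOf (c :: t) = true := by
          intro hpre
          have := (List.isPrefixOf_iff_prefix.mp hpre).length_le
          simp only [List.length_cons] at this; omega
        rw [if_neg hlen, if_neg hp,
          pv_findGo_dead sub t (i + 1) (by omega)]

theorem pv_findGo_find (sub l : List Char) : pvFindGo sub l 0 = PySem.Chars.find l sub := by
  have := pv_findGo_eq sub l 0
  simpa [PySem.Chars.find] using this

-- the second search of A (for base = 'TICKET-' + digits) lands on the same index as the first
theorem pv_find_base (l ds : List Char) (f : Nat)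
    (hf : PySem.Chars.find l pvTicket = (f : Int))
    (hds : ds = pvTakeDigits (l.drop (f + 7))) :
    PySem.Chars.find l (pvTicket ++ ds) = (f : Int) := by
  have hnn : 0 ≤ PySem.Chars.find l pvTicket := by rw [hf]; positivity
  obtain ⟨hpre, hmin⟩ := PySem.Chars.find_spec hnn
  rw [hf] at hpre hmin
  simp only [Int.toNat_natCast] at hpre hmin
  -- drop f l = pvTicket ++ r with r = drop (f+7) l
  obtain ⟨r, hr⟩ := hpre
  have hr7 : l.drop (f + 7) = r := by
    have : (l.drop f).drop 7 = r := by rw [← hr]; simp [pvTicket]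
    simpa [List.drop_drop, Nat.add_comm] using this
  have hdsr : ds <+: r := by
    rw [hds, hr7, pv_takeDigits_eq]; exact List.takeWhile_prefix _
  have hbase : (pvTicket ++ ds) <+: l.drop f := by
    rw [← hr]
    exact ⟨hdsr.choose, by rw [List.append_assoc, hdsr.choose_spec]⟩
  -- base occurs in l, so find ≥ 0
  have hinf : (pvTicket ++ ds) <:+: l := hbase.isInfix.trans (List.drop_suffix f l).isInfix
  have hg : 0 ≤ PySem.Chars.find l (pvTicket ++ ds) := by
    rw [PySem.Chars.find_nonneg_iff]; exact hinf
  obtain ⟨hgpre, hgmin⟩ := PySem.Chars.find_spec hg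
  set g := PySem.Chars.find l (pvTicket ++ ds) with hgdef
  -- g = f by double minimality
  have hgf : g.toNat = f := by
    rcases Nat.lt_trichotomy g.toNat f with h | h | h
    · exact absurd ((List.prefix_append pvTicket ds).trans hgpre) (hmin _ h)
    · exact h
    · exact absurd hbase (hgmin f h)
  omega

-- takeWhile/dropWhile bookkeeping: length of the stripped tail
theorem pv_drop_takeWhile (p : Char → Bool) (l : List Char) :
    l.drop (l.takeWhile p).length = l.dropWhile p := by
  conv_lhs => rw [← List.takeWhile_append_dropWhile (p := p) (l := l)]
  rw [List.drop_append_of_le_length (Nat.le_refl _ |>.trans (by simp))]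
  simp

theorem pvParse_eq (l : List Char) : pvParseChecklistA l = pvParseChecklistB l := by
  by_cases h0 : PySem.Chars.find l pvTicket = -1
  · simp [pvParseChecklistA, pvParseTicketA, pvParseChecklistB, pv_findGo_find, h0]
  · have hnn : 0 ≤ PySem.Chars.find l pvTicket := by
      have := PySem.Chars.neg_one_le_find (s := l) (sub := pvTicket); omega
    obtain ⟨f, hf⟩ : ∃ f : Nat, PySem.Chars.find l pvTicket = (f : Int) :=
      ⟨(PySem.Chars.find l pvTicket).toNat, (Int.toNat_of_nonneg hnn).symm⟩
    have hTD := pv_takeDigits_eq (l.drop (f + 7))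
    have hDW := pv_lstrip_eq (l.drop (f + 7))
    set rest := l.drop (f + 7) with hrest
    set ds := pvTakeDigits rest with hds
    set tail := pvLstripDigits rest with htail
    have happ : ds ++ tail = rest := by rw [hTD, hDW]; exact List.takeWhile_append_dropWhile
    have hdroplen : rest.drop ds.length = tail := by
      rw [hTD, hDW]; exact pv_drop_takeWhile _ _
    have hlen : ds.length + tail.length = rest.length := by
      rw [← happ]; simp
    have hbase := pv_find_base l ds f hf (by rw [hds, hrest])
    rw [pvParseChecklistA, pvParseTicketA, pvParseChecklistB, pv_findGo_find, hf]
    have hfne : ¬ ((f : Int) = (-1 : Int)) := by omega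
    simp only [hfne, if_false, Int.toNat_natCast, ← hrest, ← hds, ← htail]
    by_cases hdsnil : ds = []
    · have hteq : tail.length = rest.length := by
        rw [hdsnil] at hlen; simpa using hlen
      simp [hdsnil, hteq]
    · have hdpos : 0 < ds.length := List.length_pos_of_ne_nil hdsnil
      have hlt : ¬ tail.length = rest.length := by omega
      simp only [hdsnil, if_false]
      rw [pv_findGo_find, hbase]
      simp only [hfne, if_false]
      have hdt : List.drop ((f : Int).toNat + (pvTicket ++ ds).length) l = tail := by
        rw [List.length_append, Int.toNat_natCast]
        have h77 : f + (pvTicket.length + ds.length) = (f + 7) + ds.length := by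
          simp [pvTicket]; omega
        rw [h77, ← List.drop_drop, ← hrest, hdroplen]
      rw [hdt]
      cases htt : tail with
      | nil =>
          simp [PySem.Chars.startswith]
      | cons c t =>
          by_cases hc : c = '.'
          · subst hc
            have hlen2 : (pvTakeDigits t).length + (pvLstripDigits t).length = t.length := by
              rw [pv_takeDigits_eq, pv_lstrip_eq]
              rw [← List.length_append, List.takeWhile_append_dropWhile]
            have htlen : tail.length = t.length + 1 := by rw [htt]; simp
            by_cases hds2 : pvTakeDigits t = []
            · have hz : (pvLstripDigits t).length = t.length := by
                rw [hds2] at hlen2; simpa using hlen2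
              simp [PySem.Chars.startswith, List.isPrefixOf, hds2, hz]
            · have hd2pos : 0 < (pvTakeDigits t).length := List.length_pos_of_ne_nil hds2
              have hne2 : ¬ (pvLstripDigits t).length = tail.length - 1 := by omega
              have htsplit : pvTakeDigits t ++ pvLstripDigits t = t := by
                rw [pv_takeDigits_eq, pv_lstrip_eq, List.takeWhile_append_dropWhile]
              have htake : List.take (rest.length - (pvLstripDigits t).length) rest
                  = ds ++ '.' :: pvTakeDigits t := by
                have hrsplit : rest = ds ++ '.' :: (pvTakeDigits t ++ pvLstripDigits t) := by
                  rw [htsplit, ← htt, happ]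
                rw [hrsplit]
                have hidx : (ds ++ '.' :: (pvTakeDigits t ++ pvLstripDigits t)).length
                    - (pvLstripDigits t).length = ds.length + ((pvTakeDigits t).length + 1) := by
                  simp; omega
                rw [hidx, List.take_append]
                have h1 : List.take (ds.length + ((pvTakeDigits t).length + 1)) ds = ds :=
                  List.take_of_length_le (by omega)
                have h2 : ds.length + ((pvTakeDigits t).length + 1) - ds.length
                    = (pvTakeDigits t).length + 1 := by omega
                rw [h1, h2, List.take_succ_cons]
                congr 1
                congr 1
                exact List.take_left
              have hlt' : ¬ (t.length + 1 = rest.length) := by omega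
              have hne2' : ¬ ((pvLstripDigits t).length = t.length) := by omega
              simp [PySem.Chars.startswith, List.isPrefixOf, hds2, htake,
                List.append_assoc, hlt', hne2']
          · simp only [PySem.Chars.startswith, List.isPrefixOf]
            have hb : (('.' : Char) == c) = false := by
              simp only [beq_eq_false_iff_ne, ne_eq]
              exact fun h => hc h.symm
            simp [hc, hb]

-- ===== VERDICT (by name: the statement is the Claim_ definition above) =====
theorem parse_checklist_id_from_line_py_spec : Claim_equal_parse_checklist_id_from_line_py := by
  intro line _
  show _ = _
  unfold parse_checklist_id_from_line_py parse_checklist_id_from_line_py_alt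
  rw [pvParse_eq]
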